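-- pv_equiv track=rewrite | github.com/GuyBernstein/BabyHelper | app/main/service/tool_service.py | _generate_schedule_suggestions
-- ===== SOURCE A (Python) =====
-- from typing import Dict, List, Any, Optional, Type
--
-- def _generate_schedule_suggestions(events: List[Dict[str, Any]]) -> List[str]:
--     """
--     Generate basic scheduling suggestions based on events.
--     This is a placeholder for more sophisticated logic.
--     """
--     suggestions = []
--
--     # Count events by type
--     event_counts = {}
--     for event in events:
--         event_type = event['type']
--         if event_type not in event_counts:
--             event_counts[event_type] = 0
--         event_counts[event_type] += 1
--
--     # Generate suggestions based on patterns
--     if event_counts.get('doctor_visit', 0) > 2: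
--         suggestions.append("Multiple doctor visits scheduled. Consider consolidating if possible.")
--
--     if event_counts.get('medication', 0) > 0:
--         suggestions.append("Medication reminders set. Ensure supplies are stocked.")
--
--     return suggestions
-- ===== SOURCE B (Python) =====
-- from typing import Dict, List, Any
--
--
-- def _generate_schedule_suggestions(events: List[Dict[str, Any]]) -> List[str]:
--     """Generate basic scheduling suggestions based on events.
--
--     Single short-circuiting scan: a saturating doctor-visit counter (capped at 3)
--     and a medication flag; the scan stops as soon as both thresholds are settled,
--     so no per-type table is ever built.
--     """
--     doctor = 0          # saturates at 3 (the only threshold that matters)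
--     medication = False
--     for event in events:
--         if doctor >= 3 and medication:
--             break  # both suggestions already decided
--         t = event['type']
--         if t == 'doctor_visit' and doctor < 3:
--             doctor += 1
--         if t == 'medication':
--             medication = True
--     suggestions = []
--     if doctor >= 3:
--         suggestions.append("Multiple doctor visits scheduled. Consider consolidating if possible.")
--     if medication:
--         suggestions.append("Medication reminders set. Ensure supplies are stocked.")
--     return suggestions
-- ===== Notes on version B (the rewrite author's own statement) =====
-- stated objective: alternative
-- what changed: Replaces A's per-type histogram dict with a single short-circuiting scan maintaining only a saturating doctor-visit counter (capped at the threshold 3) and a medication boolean, breaking out of the loop once both suggestions are decided; no table of event types is ever built.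
import Mathlib
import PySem

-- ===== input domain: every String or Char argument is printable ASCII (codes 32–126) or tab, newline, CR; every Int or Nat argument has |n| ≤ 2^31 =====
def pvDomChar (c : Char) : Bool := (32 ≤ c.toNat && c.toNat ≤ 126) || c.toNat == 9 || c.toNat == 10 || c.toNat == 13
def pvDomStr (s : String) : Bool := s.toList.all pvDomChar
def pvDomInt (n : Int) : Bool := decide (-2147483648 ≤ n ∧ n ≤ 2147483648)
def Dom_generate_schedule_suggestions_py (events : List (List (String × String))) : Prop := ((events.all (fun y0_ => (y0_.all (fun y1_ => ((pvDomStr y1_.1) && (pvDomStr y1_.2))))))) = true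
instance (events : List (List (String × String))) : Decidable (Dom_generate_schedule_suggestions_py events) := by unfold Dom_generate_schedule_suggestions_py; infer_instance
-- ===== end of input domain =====

-- B replaces A's per-type histogram dict with a single short-circuiting scan that
-- keeps only a saturating doctor-visit counter (capped at 3) and a medication flag.

-- event['type'] (exact inside Pre_, which guarantees the key is present)
def pvTypeOf (e : List (String × String)) : String :=
  (PySem.Dict.ofList e).getD "type" ""

-- ===== PORT A =====
def generate_schedule_suggestions_py (events : List (List (String × String))) : List String :=
  -- event_counts loop: `if t not in counts: counts[t] = 0; counts[t] += 1`
  let event_counts : PySem.Dict String Int :=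
    events.foldl (fun d e =>
      let t := pvTypeOf e
      let d := if d.contains t then d else d.insert t 0
      d.modify t 0 (· + 1)) PySem.Dict.empty
  let suggestions : List String := []
  let suggestions :=
    if event_counts.getD "doctor_visit" 0 > 2 then
      suggestions ++ ["Multiple doctor visits scheduled. Consider consolidating if possible."]
    else suggestions
  let suggestions :=
    if event_counts.getD "medication" 0 > 0 then
      suggestions ++ ["Medication reminders set. Ensure supplies are stocked."]
    else suggestions
  suggestions

-- ===== PORT B =====
-- Source B's for-loop with break, as structural recursion over the remaining events
def pvScan : List (List (String × String)) → Nat → Bool → Nat × Bool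
  | [], doctor, medication => (doctor, medication)
  | e :: rest, doctor, medication =>
    if 3 ≤ doctor && medication then (doctor, medication)  -- break
    else
      let t := pvTypeOf e
      let doctor := if t == "doctor_visit" && doctor < 3 then doctor + 1 else doctor
      let medication := if t == "medication" then true else medication
      pvScan rest doctor medication

def generate_schedule_suggestions_py_alt (events : List (List (String × String))) : List String :=
  let st := pvScan events 0 false
  let suggestions : List String := []
  let suggestions :=
    if 3 ≤ st.1 then
      suggestions ++ ["Multiple doctor visits scheduled. Consider consolidating if possible."]
    else suggestions
  let suggestions :=
    if st.2 then
      suggestions ++ ["Medication reminders set. Ensure supplies are stocked."]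
    else suggestions
  suggestions

-- ===== PRECONDITION & SPEC =====
-- Pre_ excludes exactly the events without a 'type' key, on which Python A raises KeyError.
def Pre_generate_schedule_suggestions_py (events : List (List (String × String))) : Prop :=
  (events.all (fun e => (PySem.Dict.ofList e).contains "type")) = true
instance (events : List (List (String × String))) : Decidable (Pre_generate_schedule_suggestions_py events) := by
  unfold Pre_generate_schedule_suggestions_py; infer_instance

def pvWitness_generate_schedule_suggestions_py : (List (List (String × String))) :=
  [[("type", "medication")], [("type", "doctor_visit"), ("time", "9am")]]

def Spec_generate_schedule_suggestions_py (events : List (List (String × String))) (out : List String) : Prop := out = generate_schedule_suggestions_py_alt events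
instance (events : List (List (String × String))) (out : List String) : Decidable (Spec_generate_schedule_suggestions_py events out) := by unfold Spec_generate_schedule_suggestions_py; infer_instance

-- ===== CLAIM (what is proved, stated in full; the proofs are below) =====
def Claim_equal_generate_schedule_suggestions_py : Prop := ∀ (events : List (List (String × String))), Dom_generate_schedule_suggestions_py events → Pre_generate_schedule_suggestions_py events → Spec_generate_schedule_suggestions_py events (generate_schedule_suggestions_py events)

-- ===== LEMMAS AND PROOFS =====

-- A's counting loop, read off at one key: it computes the number of events of that type.
theorem pv_counts_getD (events : List (List (String × String)))
    (d : PySem.Dict String Int) (v : String) :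
    (events.foldl (fun d e =>
      let t := pvTypeOf e
      let d := if d.contains t then d else d.insert t 0
      d.modify t 0 (· + 1)) d).getD v 0
      = d.getD v 0 + ((events.countP (fun e => pvTypeOf e == v)) : Int) := by
  induction events generalizing d with
  | nil => simp
  | cons e rest ih =>
    simp only [List.foldl_cons, List.countP_cons, ih]
    by_cases hc : d.contains (pvTypeOf e) = true
    · simp only [hc, if_true, PySem.Dict.getD_modify]
      by_cases hv : v = pvTypeOf e
      · simp [hv]; ring
      · simp [hv]
        exact fun h => hv h.symm
    · simp only [hc, Bool.false_eq_true, if_false]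
      by_cases hv : v = pvTypeOf e
      · subst hv
        simp [PySem.Dict.getD_of_not_contains d 0 (by simpa using hc)]
        ring
      · simp [PySem.Dict.getD_modify, PySem.Dict.getD_insert, hv]
        exact fun h => hv h.symm

-- B's short-circuiting scan computes the saturated doctor count and the medication flag.
theorem pvScan_spec (events : List (List (String × String))) (doctor : Nat) (medication : Bool)
    (hd : doctor ≤ 3) :
    pvScan events doctor medication
      = (min 3 (doctor + events.countP (fun e => pvTypeOf e == "doctor_visit")),
         medication || events.any (fun e => pvTypeOf e == "medication")) := by
  induction events generalizing doctor medication with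
  | nil => simp [pvScan]; omega
  | cons e rest ih =>
    simp only [pvScan, List.countP_cons, List.any_cons]
    by_cases hb : (3 ≤ doctor && medication) = true
    · simp only [hb, if_true]
      simp at hb
      have hd3 : doctor = 3 := by omega
      subst hd3
      simp [hb.2]
    · simp only [hb, Bool.false_eq_true, if_false]
      have hd' : (if (pvTypeOf e == "doctor_visit" && decide (doctor < 3)) = true
          then doctor + 1 else doctor) ≤ 3 := by
        split
        · next h => simp at h; omega
        · exact hd
      rw [ih _ _ hd']
      simp only [Prod.mk.injEq]
      constructor
      · by_cases hdv : (pvTypeOf e == "doctor_visit") = true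
        · by_cases hlt : doctor < 3 <;> simp [hdv, hlt] <;> omega
        · simp [hdv]
      · by_cases hm : (pvTypeOf e == "medication") = true
        · simp [hm]
        · rw [show (pvTypeOf e == "medication") = false from by simpa using hm]
          simp

-- ===== VERDICT (by name: the statement is the Claim_ definition above) =====
theorem generate_schedule_suggestions_py_spec : Claim_equal_generate_schedule_suggestions_py := by
  intro events _ _
  unfold Spec_generate_schedule_suggestions_py
  unfold generate_schedule_suggestions_py generate_schedule_suggestions_py_alt
  simp only [pv_counts_getD, PySem.Dict.getD_empty, zero_add,
    pvScan_spec events 0 false (by omega), Bool.false_or]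
  have hdoc : ((events.countP (fun e => pvTypeOf e == "doctor_visit") : Int) > 2)
      = (3 ≤ min 3 (events.countP (fun e => pvTypeOf e == "doctor_visit"))) := by
    simp; omega
  have hmed : ((events.countP (fun e => pvTypeOf e == "medication") : Int) > 0)
      = (events.any (fun e => pvTypeOf e == "medication") = true) := by
    simp [List.countP_pos_iff, List.any_eq_true]
  split_ifs <;> simp_all
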